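-- pv_equiv track=rewrite | github.com/westurner/pyglobalgoals | notebooks/globalgoals-pyglobalgoals.py.py | _slugify_single_dash
-- ===== SOURCE A (Python) =====
-- import string
--
-- NOT_URI_CHARS = dict.fromkeys(string.punctuation + string.digits)
--
-- def _slugify(txt):
--     """an ~approximate slugify function for human-readable URI #fragments"""
--     txt = txt.strip().lower()
--     chars = (
--         (c if c != ' ' else '-') for c in txt if
--              c not in NOT_URI_CHARS)
--     return u''.join(chars)
--
-- def _slugify_single_dash(txt):
--     """
--     * unlike docutils, this function does not strip stopwords like 'and' and 'or'
--     TODO: locate this method in docutils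
--     """
--     def _one_dash_only(txt):
--         count = 0
--         for char in txt:
--             if char == '-':
--                 count += 1
--             else:
--                 if count:
--                     yield '-'
--                 yield char
--                 count = 0
--     return u''.join(_one_dash_only(_slugify(txt)))
-- ===== SOURCE B (Python) =====
-- import string
--
-- NOT_URI_CHARS = dict.fromkeys(string.punctuation + string.digits)
--
-- def _slugify(txt):
--     """an ~approximate slugify function for human-readable URI #fragments"""
--     txt = txt.strip().lower()
--     chars = (
--         (c if c != ' ' else '-') for c in txt if
--              c not in NOT_URI_CHARS)
--     return u''.join(chars)
--
-- def _slugify_single_dash(txt):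
--     return u'-'.join(filter(None, _slugify(txt).split('-')))
-- ===== Notes on version B (the rewrite author's own statement) =====
-- stated objective: idiomatic
-- what changed: Replaces the character-by-character generator that maintains a pending-dash counter with a tokenize-and-rejoin: split the slug on '-', drop empty segments with filter(None, ...), and '-'.join the rest (the C-level split/join loop also measured ~1.5x faster than the per-character Python loop).
-- intended difference: On inputs whose slug starts with a dash because the stripped text begins with punctuation/digit characters followed by a space (e.g. the input '! a'), A returns the slug with a spurious leading dash ('-a') while B returns it without ('a'), which is the intended slug since A itself already drops trailing dash runs. — e.g. on _slugify_single_dash("! a"): A returns "-a", B returns "a"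
import Mathlib
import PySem

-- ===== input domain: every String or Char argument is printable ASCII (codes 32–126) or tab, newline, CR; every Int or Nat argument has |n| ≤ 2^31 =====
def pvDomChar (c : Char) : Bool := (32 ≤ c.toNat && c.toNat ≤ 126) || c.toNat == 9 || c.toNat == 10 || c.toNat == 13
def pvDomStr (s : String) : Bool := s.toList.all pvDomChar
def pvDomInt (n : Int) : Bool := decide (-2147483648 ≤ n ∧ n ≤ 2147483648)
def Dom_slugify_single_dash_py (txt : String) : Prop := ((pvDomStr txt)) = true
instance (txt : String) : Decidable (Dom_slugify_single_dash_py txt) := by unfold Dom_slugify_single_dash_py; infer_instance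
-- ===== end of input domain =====

-- B replaces the counter-carrying character scan by split/filter/join (idiomatic); on inputs whose slug
-- starts with a dash B intentionally drops that leading dash (see D_ below).

-- ===== PORT A =====
-- NOT_URI_CHARS = dict.fromkeys(string.punctuation + string.digits)  (keys only; ported as the ordered dedup of those chars)
def NOT_URI_CHARS : List Char :=
  PySem.List.dedup ("!\"#$%&'()*+,-./:;<=>?@[\\]^_`{|}~" ++ "0123456789").toList

-- _slugify: strip+lower, then the generator '(c if c != ' ' else '-') for c in txt if c not in NOT_URI_CHARS', joined by ''
def pvSlug (txt : String) : List Char :=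
  let t := PySem.Chars.lower (PySem.Chars.strip txt.toList)
  (t.filter (fun c => !(NOT_URI_CHARS.contains c))).map (fun c => if c = ' ' then '-' else c)

-- the _one_dash_only generator: 'count' pending dashes, emit one '-' before the next non-dash char
def pvOneDash : List Char → Nat → List Char
  | [], _ => []
  | c :: rest, count =>
    if c = '-' then pvOneDash rest (count + 1)
    else (if count ≠ 0 then ['-'] else []) ++ (c :: pvOneDash rest 0)

def slugify_single_dash_py (txt : String) : String :=
  String.ofList (pvOneDash (pvSlug txt) 0)

-- ===== PORT B =====
-- return u'-'.join(filter(None, _slugify(txt).split('-')))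
def slugify_single_dash_py_alt (txt : String) : String :=
  String.ofList (PySem.Chars.join ['-']
    ((PySem.Chars.splitOn (pvSlug txt) ['-']).filter (fun p => !p.isEmpty)))

-- ===== PRECONDITION & SPEC =====
-- On inputs whose slug (the shared _slugify helper's value) starts with a dash but is not all dashes,
-- A returns it with that spurious leading dash (e.g. '! a' -> '-a'), B returns it without ('a'),
-- the intended slug since A itself already drops trailing dash runs.
def D_slugify_single_dash_py (txt : String) : Prop :=
  (pvSlug txt).head? = some '-' ∧ ((pvSlug txt).any (fun c => c ≠ '-')) = true
instance (txt : String) : Decidable (D_slugify_single_dash_py txt) := by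
  unfold D_slugify_single_dash_py; infer_instance

def Spec_slugify_single_dash_py (txt : String) (out : String) : Prop :=
  ¬ D_slugify_single_dash_py txt → out = slugify_single_dash_py_alt txt
instance (txt : String) (out : String) : Decidable (Spec_slugify_single_dash_py txt out) := by
  unfold Spec_slugify_single_dash_py; infer_instance

def pvDiffWitness_slugify_single_dash_py : String := "! a"
def pvDiffWitnessOut_slugify_single_dash_py : String × String := ("-a", "a")

-- ===== CLAIM (what is proved, stated in full; the proofs are below) =====
def Claim_unchanged_slugify_single_dash_py : Prop :=
  ∀ (txt : String), Dom_slugify_single_dash_py txt →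
    Spec_slugify_single_dash_py txt (slugify_single_dash_py txt)
def Claim_changed_slugify_single_dash_py : Prop :=
  Dom_slugify_single_dash_py (pvDiffWitness_slugify_single_dash_py) ∧
  D_slugify_single_dash_py (pvDiffWitness_slugify_single_dash_py) ∧
  slugify_single_dash_py (pvDiffWitness_slugify_single_dash_py) = pvDiffWitnessOut_slugify_single_dash_py.1 ∧
  slugify_single_dash_py_alt (pvDiffWitness_slugify_single_dash_py) = pvDiffWitnessOut_slugify_single_dash_py.2 ∧
  pvDiffWitnessOut_slugify_single_dash_py.1 ≠ pvDiffWitnessOut_slugify_single_dash_py.2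
def Claim_exact_slugify_single_dash_py : Prop :=
  ∀ (txt : String), Dom_slugify_single_dash_py txt → D_slugify_single_dash_py txt →
    slugify_single_dash_py txt ≠ slugify_single_dash_py_alt txt

-- ===== LEMMAS AND PROOFS =====

-- proof-side spec of Python's split on the single-char separator '-'
def pvSplit (pre : List Char) : List Char → List (List Char)
  | [] => [pre]
  | c :: rest => if c = '-' then pre :: pvSplit [] rest else pvSplit (pre ++ [c]) rest

theorem pv_go_cons (fuel : Nat) (c : Char) (rest cur : List Char) (acc : List (List Char)) :
    PySem.Chars.splitOn.go ['-'] (fuel+1) (c::rest) cur acc =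
      if c = '-' then PySem.Chars.splitOn.go ['-'] fuel rest [] (cur.reverse :: acc)
      else PySem.Chars.splitOn.go ['-'] fuel rest (c :: cur) acc := by
  rw [PySem.Chars.splitOn.go]
  simp [List.isPrefixOf]
  split_ifs <;> simp_all [eq_comm]

theorem pv_go_nil (fuel : Nat) (cur : List Char) (acc : List (List Char)) :
    PySem.Chars.splitOn.go ['-'] (fuel+1) [] cur acc = (cur.reverse :: acc).reverse := by
  rw [PySem.Chars.splitOn.go]
  omega

theorem pv_go_eq (fuel : Nat) : ∀ (l cur : List Char) (acc : List (List Char)) (_ : l.length < fuel),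
    PySem.Chars.splitOn.go ['-'] fuel l cur acc = acc.reverse ++ pvSplit cur.reverse l := by
  induction fuel with
  | zero => intro l cur acc h; omega
  | succ fuel ih =>
    intro l cur acc h
    cases l with
    | nil => rw [pv_go_nil]; simp [pvSplit]
    | cons c rest =>
      rw [pv_go_cons]
      by_cases hc : c = '-'
      · simp only [ih rest [] _ (by simpa using h), hc, pvSplit]
        simp
      · simp only [ih rest (c :: cur) _ (by simpa using h), pvSplit, if_neg hc]
        simp

theorem pv_splitOn_eq (s : List Char) : PySem.Chars.splitOn s ['-'] = pvSplit [] s := by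
  show PySem.Chars.splitOn.go ['-'] (s.length + 1) s [] [] = pvSplit [] s
  rw [pv_go_eq (s.length+1) s [] [] (by omega)]; simp

-- shorthand for the B-side pipeline on a char list
def pvF (cs : List Char) : List (List Char) := (pvSplit [] cs).filter (fun p => !p.isEmpty)

theorem pvF_dash (cs : List Char) : pvF ('-' :: cs) = pvF cs := by
  simp [pvF, pvSplit]

theorem pv_inter_cons (x : List Char) (L : List (List Char)) :
    List.intercalate ['-'] (x :: L) = x ++ (if L.isEmpty then [] else '-' :: List.intercalate ['-'] L) := by
  cases L with
  | nil => simp [List.intercalate]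
  | cons y ys => simp [List.intercalate, List.intersperse]

theorem pv_intercalate_split (cs : List Char) : ∀ pre : List Char, pre ≠ [] →
    List.intercalate ['-'] ((pvSplit pre cs).filter (fun p => !p.isEmpty)) =
      pre ++ (if cs.head? = some '-' ∧ pvF cs ≠ [] then ['-'] else []) ++
        List.intercalate ['-'] (pvF cs) := by
  induction cs with
  | nil => intro pre hpre; simp [pvSplit, pvF, List.intercalate, hpre]
  | cons c rest ih =>
    intro pre hpre
    by_cases hc : c = '-'
    · subst hc
      simp only [pvSplit, reduceIte, List.filter_cons]
      have hpre' : (!pre.isEmpty) = true := by simpa using hpre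
      rw [if_pos hpre', pv_inter_cons, pvF_dash]
      simp only [List.head?_cons, pvF]
      by_cases hF : (pvSplit [] rest).filter (fun p => !p.isEmpty) = [] <;> simp [hF, List.intercalate]
    · simp only [pvSplit, if_neg hc]
      rw [ih (pre ++ [c]) (by simp)]
      have h2 : pvF (c :: rest) = (pvSplit ([] ++ [c]) rest).filter (fun p => !p.isEmpty) := by
        simp [pvF, pvSplit, if_neg hc]
      rw [h2, ih ([] ++ [c]) (by simp)]
      simp [hc]

theorem pvOneDash_eq (cs : List Char) : ∀ k : Nat,
    pvOneDash cs k =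
      (if (k ≠ 0 ∨ cs.head? = some '-') ∧ pvF cs ≠ [] then ['-'] else []) ++
        List.intercalate ['-'] (pvF cs) := by
  induction cs with
  | nil => intro k; simp [pvOneDash, pvF, pvSplit, List.intercalate]
  | cons c rest ih =>
    intro k
    by_cases hc : c = '-'
    · subst hc
      simp only [pvOneDash, reduceIte, pvF_dash, List.head?_cons]
      rw [ih (k+1)]
      by_cases hF : pvF rest = [] <;> simp [hF]
    · simp only [pvOneDash, if_neg hc]
      rw [ih 0]
      have h2 : pvF (c :: rest) = (pvSplit ([] ++ [c]) rest).filter (fun p => !p.isEmpty) := by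
        simp [pvF, pvSplit, if_neg hc]
      have h3 := pv_intercalate_split rest ([] ++ [c]) (by simp)
      rw [← h2] at h3
      have hne : pvF (c :: rest) ≠ [] := by
        intro h; rw [h] at h3; simp [List.intercalate] at h3
      rw [h3]
      by_cases hk : k = 0 <;> simp [hk, hc, hne]

theorem pvF_cons_ne {c : Char} (cs : List Char) (hc : c ≠ '-') : pvF (c :: cs) ≠ [] := by
  have h2 : pvF (c :: cs) = (pvSplit ([] ++ [c]) cs).filter (fun p => !p.isEmpty) := by
    simp [pvF, pvSplit, if_neg hc]
  have h3 := pv_intercalate_split cs ([] ++ [c]) (by simp)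
  rw [← h2] at h3
  intro h; rw [h] at h3; simp [List.intercalate] at h3

theorem pvF_eq_nil_iff (cs : List Char) : pvF cs = [] ↔ ∀ c ∈ cs, c = '-' := by
  induction cs with
  | nil => simp [pvF, pvSplit]
  | cons c rest ih =>
    by_cases hc : c = '-'
    · subst hc; rw [pvF_dash]; simp [ih]
    · simp [pvF_cons_ne rest hc, hc]

theorem pv_alt_eq (txt : String) :
    slugify_single_dash_py_alt txt = String.ofList (List.intercalate ['-'] (pvF (pvSlug txt))) := by
  unfold slugify_single_dash_py_alt
  rw [pv_splitOn_eq]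
  rfl

-- ===== VERDICT (by name: the statement is the Claim_ definition above) =====
theorem slugify_single_dash_py_spec : Claim_unchanged_slugify_single_dash_py := by
  intro txt _
  unfold Spec_slugify_single_dash_py
  intro hD
  rw [pv_alt_eq]
  unfold slugify_single_dash_py
  rw [pvOneDash_eq (pvSlug txt) 0]
  have hcond : ¬((((0:Nat) ≠ 0) ∨ (pvSlug txt).head? = some '-') ∧ pvF (pvSlug txt) ≠ []) := by
    rintro ⟨h1, h2⟩
    rcases h1 with h1 | h1
    · exact h1 rfl
    · apply hD
      refine ⟨h1, ?_⟩
      rw [Ne, pvF_eq_nil_iff] at h2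
      rw [List.any_eq_true]
      by_contra hno
      push Not at hno
      exact h2 (fun c hc => by simpa using hno c hc)
  rw [if_neg hcond]
  simp

set_option maxRecDepth 4096 in
theorem slugify_single_dash_py_changed : Claim_changed_slugify_single_dash_py := by
  unfold Claim_changed_slugify_single_dash_py; decide

theorem slugify_single_dash_py_tight : Claim_exact_slugify_single_dash_py := by
  intro txt _ hD heq
  obtain ⟨hhead, hany⟩ := hD
  rw [List.any_eq_true] at hany
  obtain ⟨c, hc, hcne⟩ := hany
  have hne : pvF (pvSlug txt) ≠ [] := by
    rw [Ne, pvF_eq_nil_iff]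
    intro hall
    exact absurd (hall c hc) (by simpa using hcne)
  rw [pv_alt_eq] at heq
  unfold slugify_single_dash_py at heq
  rw [pvOneDash_eq (pvSlug txt) 0, if_pos ⟨Or.inr hhead, hne⟩] at heq
  have := congrArg String.toList heq
  simp only [String.toList_ofList, List.singleton_append] at this
  exact List.cons_ne_self _ _ this
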